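-- pv_equiv track=rewrite | github.com/jeremyfleche/Advent-of-Code | 2019/1/1.py | carburant
-- ===== SOURCE A (Python) =====
-- def carburant(masse):
-- 	x=masse
-- 	res=0
-- 	while x>0:
-- 		if x//3-2 > 0:
-- 			res+=x//3-2
-- 		x=x//3-2
-- 	return res
-- ===== SOURCE B (Python) =====
-- def carburant(masse):
--     f = masse // 3 - 2
--     return f + carburant(f) if f > 0 else 0
-- ===== Notes on version B (the rewrite author's own statement) =====
-- stated objective: simpler
-- what changed: Replaced the while loop with mutable accumulator by a direct recursion over the fuel chain that returns the sum.
import Mathlib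
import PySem

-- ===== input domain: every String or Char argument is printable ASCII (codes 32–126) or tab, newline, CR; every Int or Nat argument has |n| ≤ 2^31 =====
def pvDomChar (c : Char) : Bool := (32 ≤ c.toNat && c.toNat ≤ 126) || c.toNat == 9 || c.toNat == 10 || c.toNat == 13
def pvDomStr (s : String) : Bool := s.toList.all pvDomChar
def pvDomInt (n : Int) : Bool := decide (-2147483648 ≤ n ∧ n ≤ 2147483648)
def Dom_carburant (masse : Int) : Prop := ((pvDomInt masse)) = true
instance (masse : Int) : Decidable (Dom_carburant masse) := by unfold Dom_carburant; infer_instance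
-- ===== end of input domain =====

-- B replaces A's while loop + mutable accumulator by a direct recursion over the fuel chain (simpler decomposition).

-- x ≤ 0 makes the fuel step non-positive
theorem pv_floordiv_lt3 (x : Int) (hx : x ≤ 0) : PySem.Int.floordiv x 3 < 3 := by
  rw [PySem.Int.floordiv_lt_iff_lt_mul (by norm_num : (0:Int) < 3)]; omega

-- step strictly shrinks a positive x (used for termination of both ports)
theorem pv_step_lt (x : Int) (hx : 0 < x) :
    (PySem.Int.floordiv x 3 - 2).toNat < x.toNat := by
  rw [PySem.Int.floordiv_eq_ediv_of_pos (by omega)]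
  have := Int.ediv_le_self x (le_of_lt hx)
  have h2 : 0 ≤ x / 3 := Int.ediv_nonneg (le_of_lt hx) (by omega)
  omega

-- ===== PORT A =====
-- the while loop of A, state (x, res)
def carburantLoop (x res : Int) : Int :=
  if h : x > 0 then
    carburantLoop (PySem.Int.floordiv x 3 - 2)
      (if PySem.Int.floordiv x 3 - 2 > 0 then res + (PySem.Int.floordiv x 3 - 2) else res)
  else res
termination_by x.toNat
decreasing_by exact pv_step_lt x h

def carburant (masse : Int) : Int := carburantLoop masse 0

-- ===== PORT B =====
def carburant_alt (masse : Int) : Int :=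
  if h : PySem.Int.floordiv masse 3 - 2 > 0 then
    (PySem.Int.floordiv masse 3 - 2) + carburant_alt (PySem.Int.floordiv masse 3 - 2)
  else 0
termination_by masse.toNat
decreasing_by
  refine pv_step_lt masse ?_
  by_contra hn
  exact absurd h (by have := pv_floordiv_lt3 masse (by omega); omega)

-- ===== PRECONDITION & SPEC =====
def Spec_carburant (masse : Int) (out : Int) : Prop := out = carburant_alt masse
instance (masse : Int) (out : Int) : Decidable (Spec_carburant masse out) := by unfold Spec_carburant; infer_instance

-- ===== CLAIM (what is proved, stated in full; the proofs are below) =====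
def Claim_equal_carburant : Prop := ∀ (masse : Int), Dom_carburant masse → Spec_carburant masse (carburant masse)

-- ===== LEMMAS AND PROOFS =====
theorem carburant_alt_nonpos (x : Int) (hx : x ≤ 0) : carburant_alt x = 0 := by
  rw [carburant_alt, dif_neg (by have := pv_floordiv_lt3 x hx; omega)]

theorem carburantLoop_eq (x res : Int) : carburantLoop x res = res + carburant_alt x := by
  by_cases hx : x > 0
  · rw [carburantLoop, carburant_alt]
    simp only [hx, dite_true]
    set f := PySem.Int.floordiv x 3 - 2 with hf
    by_cases hfp : f > 0
    · simp only [hfp, if_true, dite_true]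
      rw [carburantLoop_eq f (res + f)]
      ring
    · simp only [hfp, if_false, dite_false]
      rw [carburantLoop_eq f res, carburant_alt_nonpos f (by omega)]
  · rw [carburantLoop, carburant_alt_nonpos x (by omega)]
    simp [hx]
termination_by x.toNat
decreasing_by all_goals exact pv_step_lt x hx

-- ===== VERDICT (by name: the statement is the Claim_ definition above) =====
theorem carburant_spec : Claim_equal_carburant := by
  intro masse _
  unfold Spec_carburant carburant
  simpa using carburantLoop_eq masse 0
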